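-- pv_equiv track=rewrite | github.com/mohit-756/interview_bot_project_1 | tests/test_question_generation_api_smoke.py | _coverage_flags
-- ===== SOURCE A (Python) =====
-- def _coverage_flags(questions: list[dict[str, object]]) -> dict[str, bool]:
--     categories = {
--         str(item.get("category") or item.get("type") or "").strip().lower()
--         for item in questions
--         if isinstance(item, dict)
--     }
--     return {
--         "has_intro": "intro" in categories,
--         "has_project_like": bool(categories & {"project", "deep_dive", "architecture", "leadership"}),
--         "has_behavioral": "behavioral" in categories,
--     }
-- ===== SOURCE B (Python) =====
-- _FLAG_OF = {
--     "intro": "has_intro",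
--     "project": "has_project_like",
--     "deep_dive": "has_project_like",
--     "architecture": "has_project_like",
--     "leadership": "has_project_like",
--     "behavioral": "has_behavioral",
-- }
--
--
-- def _coverage_flags(questions: list[dict[str, object]]) -> dict[str, bool]:
--     flags = {"has_intro": False, "has_project_like": False, "has_behavioral": False}
--     for item in questions:
--         if not isinstance(item, dict):
--             continue
--         key = _FLAG_OF.get(str(item.get("category") or item.get("type") or "").strip().lower())
--         if key is not None:
--             flags[key] = True
--     return flags
-- ===== Notes on version B (the rewrite author's own statement) =====
-- stated objective: alternative
-- what changed: B is table-driven: instead of building the intermediate set of normalized categories and then querying it with membership tests and a set intersection, B maps each item's normalized category through a precomputed category-to-flag lookup dict and sets the flag it points to in a single pass, so no category set and no comparison of categories against literals remains in the loop.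
import Mathlib
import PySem

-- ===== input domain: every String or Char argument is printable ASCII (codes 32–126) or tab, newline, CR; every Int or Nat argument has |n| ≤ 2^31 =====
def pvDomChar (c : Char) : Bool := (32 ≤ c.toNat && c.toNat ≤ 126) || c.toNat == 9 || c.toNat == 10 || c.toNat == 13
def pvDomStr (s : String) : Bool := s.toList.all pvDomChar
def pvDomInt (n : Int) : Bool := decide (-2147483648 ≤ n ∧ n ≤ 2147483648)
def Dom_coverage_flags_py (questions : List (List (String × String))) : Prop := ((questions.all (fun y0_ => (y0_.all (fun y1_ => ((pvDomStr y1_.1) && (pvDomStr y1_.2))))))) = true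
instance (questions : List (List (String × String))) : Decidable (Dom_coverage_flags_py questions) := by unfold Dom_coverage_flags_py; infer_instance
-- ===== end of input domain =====

-- B is table-driven: a category→flag lookup dict replaces A's intermediate
-- category set and its membership/intersection queries; objective: alternative.

-- shared helper: str(item.get("category") or item.get("type") or "").strip().lower()
-- (identical expression in both Pythons; 'or' takes the right operand on None/empty string)
-- first-match lookup on the association list (dict.get under the type convention)
def pvGet? (d : List (String × String)) (k : String) : Option String :=
  (d.find? (fun p => p.1 == k)).map Prod.snd

def pvOrStr (o : Option String) (e : String) : String :=
  match o with
  | some s => if s = "" then e else s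
  | none => e

def pvNorm (item : List (String × String)) : String :=
  PySem.Str.lower (PySem.Str.strip
    (pvOrStr (pvGet? item "category") (pvOrStr (pvGet? item "type") "")))

-- ===== PORT A =====
def coverage_flags_py (questions : List (List (String × String))) : List (String × Bool) :=
  -- set comprehension over questions (all items are dicts under the type convention)
  let categories : PySem.Set String := PySem.Set.ofList (questions.map pvNorm)
  [("has_intro", PySem.Set.contains categories "intro"),
   -- bool(categories & {...}): truthiness of the intersection set
   ("has_project_like",
      !(PySem.Set.inter categories
          (PySem.Set.ofList ["project", "deep_dive", "architecture", "leadership"])).isEmpty),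
   ("has_behavioral", PySem.Set.contains categories "behavioral")]

-- ===== PORT B =====
-- the module-level table _FLAG_OF (a Python dict)
def pvFlagOf : PySem.Dict String String :=
  PySem.Dict.ofList
    [("intro", "has_intro"),
     ("project", "has_project_like"),
     ("deep_dive", "has_project_like"),
     ("architecture", "has_project_like"),
     ("leadership", "has_project_like"),
     ("behavioral", "has_behavioral")]

def coverage_flags_py_alt (questions : List (List (String × String))) : List (String × Bool) :=
  (questions.foldl
    (fun (flags : PySem.Dict String Bool) item =>
      match pvFlagOf.get? (pvNorm item) with   -- _FLAG_OF.get(...)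
      | some key => flags.insert key true      -- flags[key] = True
      | none => flags)
    (PySem.Dict.ofList
      [("has_intro", false), ("has_project_like", false), ("has_behavioral", false)])).items

-- ===== PRECONDITION & SPEC =====
def Spec_coverage_flags_py (questions : List (List (String × String))) (out : List (String × Bool)) : Prop := out = coverage_flags_py_alt questions
instance (questions : List (List (String × String))) (out : List (String × Bool)) : Decidable (Spec_coverage_flags_py questions out) := by unfold Spec_coverage_flags_py; infer_instance

-- ===== CLAIM (what is proved, stated in full; the proofs are below) =====
def Claim_equal_coverage_flags_py : Prop := ∀ (questions : List (List (String × String))), Dom_coverage_flags_py questions → Spec_coverage_flags_py questions (coverage_flags_py questions)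

-- ===== LEMMAS AND PROOFS =====

-- the table lookup, characterized
theorem pvFlagOf_get (c : String) :
    pvFlagOf.get? c =
      if c = "intro" then some "has_intro"
      else if c = "project" ∨ c = "deep_dive" ∨ c = "architecture" ∨ c = "leadership" then
        some "has_project_like"
      else if c = "behavioral" then some "has_behavioral"
      else none := by
  have hm : pvFlagOf = PySem.Dict.mk
      [("intro", "has_intro"), ("project", "has_project_like"), ("deep_dive", "has_project_like"),
       ("architecture", "has_project_like"), ("leadership", "has_project_like"),
       ("behavioral", "has_behavioral")] := by decide
  rw [hm]
  split_ifs with h1 h2 h3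
  · subst h1; decide
  · rcases h2 with h | h | h | h <;> subst h <;> decide
  · subst h3; decide
  · simp only [PySem.Dict.get?_mk_cons, beq_iff_eq]
    rw [if_neg (fun h => h1 h.symm),
        if_neg (fun h => h2 (Or.inl h.symm)),
        if_neg (fun h => h2 (Or.inr (Or.inl h.symm))),
        if_neg (fun h => h2 (Or.inr (Or.inr (Or.inl h.symm)))),
        if_neg (fun h => h2 (Or.inr (Or.inr (Or.inr h.symm)))),
        if_neg (fun h => h3 h.symm)]
    rfl

-- every key the table can return is one of the three flag names
theorem pvFlagOf_range (c k : String) (h : pvFlagOf.get? c = some k) :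
    k = "has_intro" ∨ k = "has_project_like" ∨ k = "has_behavioral" := by
  rw [pvFlagOf_get] at h
  split_ifs at h <;> simp_all

-- a table hit on key "has_intro" is exactly category "intro"
theorem pvHit_intro (c : String) :
    (pvFlagOf.get? c == some ("has_intro" : String)) = (c == "intro") := by
  rw [pvFlagOf_get]
  split_ifs with h1 h2 h3
  · subst h1; decide
  · have : (c == "intro") = false := by simp [h1]
    rw [this]; decide
  · have : (c == "intro") = false := by simp [h1]
    rw [this]; decide
  · have : (c == "intro") = false := by simp [h1]
    rw [this]; decide

-- a table hit on key "has_project_like" is exactly a project-like category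
theorem pvHit_project (c : String) :
    (pvFlagOf.get? c == some ("has_project_like" : String))
      = (["project", "deep_dive", "architecture", "leadership"].contains c) := by
  rw [pvFlagOf_get]
  split_ifs with h1 h2 h3
  · subst h1; decide
  · rcases h2 with h | h | h | h <;> subst h <;> decide
  · subst h3; decide
  · have : (["project", "deep_dive", "architecture", "leadership"].contains c) = false := by
      simp only [List.contains_eq_any_beq, List.any_cons, List.any_nil, Bool.or_false,
        Bool.or_eq_false_iff, beq_eq_false_iff_ne, ne_eq]
      exact ⟨fun h => h2 (Or.inl h), fun h => h2 (Or.inr (Or.inl h)),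
        fun h => h2 (Or.inr (Or.inr (Or.inl h))), fun h => h2 (Or.inr (Or.inr (Or.inr h)))⟩
    rw [this]; decide

-- a table hit on key "has_behavioral" is exactly category "behavioral"
theorem pvHit_behav (c : String) :
    (pvFlagOf.get? c == some ("has_behavioral" : String)) = (c == "behavioral") := by
  rw [pvFlagOf_get]
  split_ifs with h1 h2 h3
  · subst h1
    have : (("intro" : String) == "behavioral") = false := by decide
    rw [this]; decide
  · rcases h2 with h | h | h | h <;> subst h <;> decide
  · subst h3; decide
  · have : (c == "behavioral") = false := by simp [h3]
    rw [this]; decide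

-- B's loop over the flag dict: keys are preserved and each flag accumulates
-- the disjunction of its table hits
theorem pvFold_char (questions : List (List (String × String)))
    (d : PySem.Dict String Bool)
    (hk : d.keys = ["has_intro", "has_project_like", "has_behavioral"]) :
    (questions.foldl
      (fun (flags : PySem.Dict String Bool) item =>
        match pvFlagOf.get? (pvNorm item) with
        | some key => flags.insert key true
        | none => flags) d).keys = ["has_intro", "has_project_like", "has_behavioral"]
    ∧ ∀ k : String,
        (questions.foldl
          (fun (flags : PySem.Dict String Bool) item =>
            match pvFlagOf.get? (pvNorm item) with
            | some key => flags.insert key true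
            | none => flags) d).getD k false
        = (d.getD k false || questions.any (fun q => pvFlagOf.get? (pvNorm q) == some k)) := by
  induction questions generalizing d with
  | nil => exact ⟨hk, fun k => by simp⟩
  | cons q qs ih =>
      rw [List.foldl_cons]
      cases hq : pvFlagOf.get? (pvNorm q) with
      | none =>
          obtain ⟨ihk, ihg⟩ := ih d hk
          refine ⟨ihk, fun k => ?_⟩
          rw [ihg k]
          simp [hq]
      | some key =>
          have hmem : key ∈ d.keys := by
            rw [hk]
            rcases pvFlagOf_range _ _ hq with h | h | h <;> subst h <;> decide
          have hcont : d.contains key = true :=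
            (PySem.Dict.contains_iff_mem_keys d key).mpr hmem
          have hkeys : (d.insert key true).keys = d.keys :=
            PySem.Dict.keys_insert_of_contains d true hcont
          obtain ⟨ihk, ihg⟩ := ih (d.insert key true) (hkeys.trans hk)
          refine ⟨ihk, fun k => ?_⟩
          rw [ihg k]
          rw [PySem.Dict.getD_insert]
          simp only [List.any_cons, hq]
          by_cases hkk : k = key
          · subst hkk; simp
          · have : (some k == some key) = false := by simp [hkk]
            have h2 : (some key == some k) = false := by simp [Ne.symm hkk]
            simp [hkk, h2]

-- membership test in A's category set = any over the item list
theorem pvContains_eq (questions : List (List (String × String))) (x : String) :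
    PySem.Set.contains (PySem.Set.ofList (questions.map pvNorm)) x
      = questions.any (fun q => pvNorm q == x) := by
  rw [Bool.eq_iff_iff]
  simp only [PySem.Set.contains, List.contains_iff_mem, PySem.Set.mem_ofList, List.mem_map,
    List.any_eq_true, beq_iff_eq]

-- nonemptiness of A's intersection = any item whose category is project-like
theorem pvInter_eq (questions : List (List (String × String))) (t : List String) :
    (!(PySem.Set.inter (PySem.Set.ofList (questions.map pvNorm)) t).isEmpty)
      = questions.any (fun q => t.contains (pvNorm q)) := by
  rw [Bool.eq_iff_iff]
  simp only [Bool.not_eq_eq_eq_not, Bool.not_true, List.isEmpty_eq_false_iff_exists_mem, List.any_eq_true]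
  rw [← not_iff_not]
  push Not
  simp [PySem.Set.mem_inter, PySem.Set.mem_ofList]

-- ===== VERDICT (by name: the statement is the Claim_ definition above) =====
theorem coverage_flags_py_spec : Claim_equal_coverage_flags_py := by
  intro questions _
  unfold Spec_coverage_flags_py coverage_flags_py coverage_flags_py_alt
  obtain ⟨hk, hg⟩ := pvFold_char questions
    (PySem.Dict.ofList [("has_intro", false), ("has_project_like", false), ("has_behavioral", false)])
    (by decide)
  rw [PySem.Dict.items_eq_map_keys _ (by rw [hk]; decide) false, hk]
  simp only [List.map_cons, List.map_nil]
  rw [hg "has_intro", hg "has_project_like", hg "has_behavioral"]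
  rw [show (PySem.Dict.ofList [("has_intro", false), ("has_project_like", false), ("has_behavioral", false)]).getD "has_intro" false = false from by decide,
      show (PySem.Dict.ofList [("has_intro", false), ("has_project_like", false), ("has_behavioral", false)]).getD "has_project_like" false = false from by decide,
      show (PySem.Dict.ofList [("has_intro", false), ("has_project_like", false), ("has_behavioral", false)]).getD "has_behavioral" false = false from by decide]
  simp only [Bool.false_or, pvHit_intro, pvHit_project, pvHit_behav]
  rw [pvContains_eq, pvContains_eq, pvInter_eq]
  have h : PySem.Set.ofList ["project", "deep_dive", "architecture", "leadership"]
      = ["project", "deep_dive", "architecture", "leadership"] := by decide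
  rw [h]
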